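-- pv_equiv track=rewrite | github.com/dkapur17/TOCPrograms | codes/2.NFA2DFA.py | gen_DFA_states
-- ===== SOURCE A (Python) =====
-- def gen_DFA_states(nfa_states):
--
--     state_count = 2**(len(nfa_states))
--     dfa_states = []
--
--     for i in range(state_count):
--         state = []
--         mask = 1
--         idx = 0
--         while mask <= i:
--             if i & mask:
--                 state.append(nfa_states[idx])
--             mask <<= 1
--             idx += 1
--
--         dfa_states.append(sorted(state))
--
--     return dfa_states
-- ===== SOURCE B (Python) =====
-- def gen_DFA_states(nfa_states):
--     dfa_states = [[]]
--     for s in nfa_states: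
--         dfa_states = dfa_states + [subset + [s] for subset in dfa_states]
--     return [sorted(subset) for subset in dfa_states]
-- ===== Notes on version B (the rewrite author's own statement) =====
-- stated objective: idiomatic
-- what changed: Replaces the per-index inner bit-decoding while-loop with an iterative power-set doubling (dfa_states = dfa_states + [subset+[s] ...]) that produces the same binary-counting order without any masks.
import Mathlib
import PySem

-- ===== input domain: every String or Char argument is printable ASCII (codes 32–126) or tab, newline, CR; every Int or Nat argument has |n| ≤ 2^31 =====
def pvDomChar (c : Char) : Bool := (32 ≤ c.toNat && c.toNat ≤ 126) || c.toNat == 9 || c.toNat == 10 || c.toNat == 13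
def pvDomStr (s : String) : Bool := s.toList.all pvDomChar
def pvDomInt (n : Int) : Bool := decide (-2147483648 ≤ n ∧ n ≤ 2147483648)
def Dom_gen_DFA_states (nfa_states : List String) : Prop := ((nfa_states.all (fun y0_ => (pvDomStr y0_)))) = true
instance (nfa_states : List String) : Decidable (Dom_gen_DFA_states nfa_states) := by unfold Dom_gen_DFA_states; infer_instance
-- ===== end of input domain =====

-- B replaces A's per-index inner bit-decoding while-loop by iterative power-set doubling
-- (same subset order, same per-subset sort); objective: idiomatic.

-- ===== PORT A =====
-- A's inner while loop: 'while mask <= i: if i & mask: state.append(nfa_states[idx]); mask <<= 1; idx += 1'.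
-- The '0 < mask' conjunct only makes the recursion total (mask starts at 1 and doubles, so it always holds).
-- nfa_states[idx] is always in range when reached (mask = 2^idx ≤ i < 2^len), so getD's default is never used.
def genLoopA (nfa_states : List String) (i mask idx : Nat) (state : List String) : List String :=
  if _h : 0 < mask ∧ mask ≤ i then
    genLoopA nfa_states i (mask * 2) (idx + 1)
      (if i &&& mask ≠ 0 then state ++ [nfa_states.getD idx ""] else state)
  else state
termination_by i + 1 - mask
decreasing_by omega

def gen_DFA_states (nfa_states : List String) : List (List String) :=
  (List.range (2 ^ nfa_states.length)).map
    (fun i => PySem.List.sorted (genLoopA nfa_states i 1 0 []) (fun x => x) false)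

-- ===== PORT B =====
def gen_DFA_states_alt (nfa_states : List String) : List (List String) :=
  (nfa_states.foldl (fun acc s => acc ++ acc.map (fun subset => subset ++ [s])) [[]]).map
    (fun subset => PySem.List.sorted subset (fun x => x) false)

-- ===== PRECONDITION & SPEC =====
def Spec_gen_DFA_states (nfa_states : List String) (out : List (List String)) : Prop := out = gen_DFA_states_alt nfa_states
instance (nfa_states : List String) (out : List (List String)) : Decidable (Spec_gen_DFA_states nfa_states out) := by unfold Spec_gen_DFA_states; infer_instance

-- ===== CLAIM (what is proved, stated in full; the proofs are below) =====
def Claim_equal_gen_DFA_states : Prop := ∀ (nfa_states : List String), Dom_gen_DFA_states nfa_states → Spec_gen_DFA_states nfa_states (gen_DFA_states nfa_states)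

-- ===== LEMMAS AND PROOFS =====

-- the subset of l selected by the binary digits of i (bit 0 ↔ head of l)
def pvBits : List String → Nat → List String
  | [], _ => []
  | s :: rest, i => (if i % 2 = 1 then [s] else []) ++ pvBits rest (i / 2)

theorem pvBits_zero (l : List String) : pvBits l 0 = [] := by
  induction l with
  | nil => rfl
  | cons s rest ih => simp [pvBits, ih]

theorem genLoopA_eq (rest : List String) : ∀ (nfa : List String) (k i : Nat) (state : List String),
    nfa.drop k = rest → i < 2 ^ k * 2 ^ rest.length →
    genLoopA nfa i (2 ^ k) k state = state ++ pvBits rest (i / 2 ^ k) := by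
  induction rest with
  | nil =>
    intro nfa k i state _ hi
    rw [genLoopA]
    have : ¬ (2 ^ k ≤ i) := by simpa using hi
    simp [this, pvBits]
  | cons s rest' ih =>
    intro nfa k i state hd hi
    have hget? : nfa[k]? = some s := by
      have : (nfa.drop k)[0]? = some s := by rw [hd]; rfl
      simpa using this
    have hget : nfa.getD k "" = s := by
      simp [List.getD_eq_getElem?_getD, hget?]
    have hd' : nfa.drop (k + 1) = rest' := by
      have : (nfa.drop k).drop 1 = rest' := by rw [hd]; rfl
      simpa [List.drop_drop] using this
    by_cases hc : 2 ^ k ≤ i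
    · rw [genLoopA]
      have hpos : 0 < 2 ^ k := Nat.two_pow_pos k
      simp only [hpos, hc, and_self, dif_pos]
      have hmask : 2 ^ k * 2 = 2 ^ (k + 1) := by rw [pow_succ]
      have hi' : i < 2 ^ (k + 1) * 2 ^ rest'.length := by
        have : (2 : ℕ) ^ k * 2 ^ (rest'.length + 1) = 2 ^ (k + 1) * 2 ^ rest'.length := by ring
        simpa [this] using hi
      rw [hmask, ih nfa (k + 1) i _ hd' hi']
      have hdiv : i / 2 ^ (k + 1) = i / 2 ^ k / 2 := by
        rw [pow_succ, Nat.div_div_eq_div_mul]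
      have hbit : (i &&& 2 ^ k ≠ 0) ↔ (i / 2 ^ k % 2 = 1) := by
        rw [Nat.and_two_pow, Nat.testBit_eq_decide_div_mod_eq]
        by_cases hb : i / 2 ^ k % 2 = 1 <;> simp [hb]
      by_cases hb : i / 2 ^ k % 2 = 1
      · rw [if_pos (hbit.mpr hb)]
        simp [pvBits, hb, hdiv, hget?]
      · rw [if_neg (fun h => hb (hbit.mp h))]
        simp [pvBits, hb, hdiv]
    · rw [genLoopA]
      simp only [hc, and_false, dif_neg, not_false_eq_true]
      have : i / 2 ^ k = 0 := Nat.div_eq_of_lt (by omega)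
      simp [this, pvBits_zero]

theorem portA_eq (nfa : List String) :
    gen_DFA_states nfa =
      (List.range (2 ^ nfa.length)).map
        (fun i => PySem.List.sorted (pvBits nfa i) (fun x => x) false) := by
  unfold gen_DFA_states
  apply List.map_congr_left
  intro i hi
  rw [List.mem_range] at hi
  have h := genLoopA_eq nfa nfa 0 i [] (by simp) (by simpa using hi)
  simp only [pow_zero, Nat.div_one] at h
  rw [h]
  simp

theorem range_two_mul_flatMap {α : Type} (n : Nat) (f : Nat → List α) :
    (List.range (2 * n)).flatMap f
      = (List.range n).flatMap (fun j => f (2 * j) ++ f (2 * j + 1)) := by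
  induction n with
  | zero => simp
  | succ n ih =>
    have h2 : 2 * (n + 1) = (2 * n + 1) + 1 := by ring
    rw [h2, List.range_succ, List.range_succ, List.range_succ]
    simp [List.flatMap_append, ih]

theorem foldl_doubling : ∀ (l : List String) (acc : List (List String)),
    l.foldl (fun acc s => acc ++ acc.map (fun subset => subset ++ [s])) acc
      = (List.range (2 ^ l.length)).flatMap (fun i => acc.map (fun t => t ++ pvBits l i)) := by
  intro l
  induction l with
  | nil => intro acc; simp [pvBits]
  | cons s l' ih =>
    intro acc
    rw [List.foldl_cons, ih]
    have hp : (2 : ℕ) ^ (s :: l').length = 2 * 2 ^ l'.length := by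
      simp [pow_succ]; ring
    rw [hp, range_two_mul_flatMap]
    apply List.flatMap_congr
    intro j _
    have hbe : pvBits (s :: l') (2 * j) = pvBits l' j := by
      simp [pvBits, Nat.mul_mod_right]
    have hbo : pvBits (s :: l') (2 * j + 1) = s :: pvBits l' j := by
      have h1 : (2 * j + 1) % 2 = 1 := by omega
      have h2 : (2 * j + 1) / 2 = j := by omega
      simp [pvBits, h1, h2]
    rw [hbe, hbo]
    simp [List.map_append, List.map_map, Function.comp, List.append_assoc]

theorem portB_eq (nfa : List String) :
    gen_DFA_states_alt nfa =
      (List.range (2 ^ nfa.length)).map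
        (fun i => PySem.List.sorted (pvBits nfa i) (fun x => x) false) := by
  unfold gen_DFA_states_alt
  rw [foldl_doubling]
  simp [← List.map_eq_flatMap]

-- ===== VERDICT (by name: the statement is the Claim_ definition above) =====
theorem gen_DFA_states_spec : Claim_equal_gen_DFA_states := by
  intro nfa _
  unfold Spec_gen_DFA_states
  rw [portA_eq, portB_eq]
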